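-- pv_equiv track=rewrite | github.com/nithinmuthukumar/MiningFrequentItemsets | count_frequent_pairs.py | pcy
-- ===== SOURCE A (Python) =====
-- from collections import Counter
-- from itertools import combinations
--
-- def pcy(baskets, support, bucket_size):
--     bucket = [0] * bucket_size
--
--     for basket in baskets:
--         pairs = set(combinations(basket, 2))
--         for pair in pairs:
--             key = hash_pair_1(pair) % bucket_size
--             bucket[key] += 1
--     bit_vector = get_bit_vector(bucket, support)
--     del bucket
--
--     frequent_items = get_frequent_items(baskets, support)
--
--     frequent_pairs = dict()
--     for pair in combinations(frequent_items.keys(), 2):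
--         key = hash_pair_1(pair) % bucket_size
--         if bit_vector[key]:
--             pair_count = sum(
--                 1 for basket in baskets if all(item in basket for item in pair)
--             )
--             if pair_count >= support:
--                 frequent_pairs[pair] = pair_count
--     return frequent_pairs
--
-- def get_bit_vector(buckets, support):
--     return [i >= support for i in buckets]  # size of bool is also 1
--
-- def hash_pair_1(pair):
--     return (pair[0] + pair[1]) % 80021
--
-- def get_frequent_items(baskets, support):
--     occurrences = Counter()
--
--     for basket in baskets:
--         occurrences.update(basket)
--     frequent_items = {k: v for (k, v) in occurrences.items() if v >= support}
--     return frequent_items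
-- ===== SOURCE B (Python) =====
-- from collections import Counter
-- from itertools import combinations
--
-- def pcy(baskets, support, bucket_size):
--     # phase 1: PCY bucket hashing (same hashing scheme; it defines the output)
--     bucket = [0] * bucket_size
--     for basket in baskets:
--         for pair in set(combinations(basket, 2)):
--             bucket[(pair[0] + pair[1]) % 80021 % bucket_size] += 1
--     bit_vector = [c >= support for c in bucket]
--
--     # frequent items, in first-occurrence order
--     occurrences = Counter()
--     for basket in baskets:
--         occurrences.update(basket)
--     frequent_items = [k for k, v in occurrences.items() if v >= support]
--
--     # single pass over the baskets: count each co-occurring frequent pair once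
--     pair_counts = Counter()
--     for basket in baskets:
--         present = [k for k in frequent_items if k in basket]
--         pair_counts.update(combinations(present, 2))
--
--     result = {}
--     for pair in combinations(frequent_items, 2):
--         if bit_vector[(pair[0] + pair[1]) % 80021 % bucket_size]:
--             c = pair_counts[pair]
--             if c >= support:
--                 result[pair] = c
--     return result
-- ===== Notes on version B (the rewrite author's own statement) =====
-- stated objective: alternative
-- what changed: Replaces the per-candidate-pair rescan of all baskets (one full membership scan for each of the F^2 candidate pairs) with a single pass over the baskets that counts every co-occurring frequent pair once in a Counter, then emits in the same combinations order.
import Mathlib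
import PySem

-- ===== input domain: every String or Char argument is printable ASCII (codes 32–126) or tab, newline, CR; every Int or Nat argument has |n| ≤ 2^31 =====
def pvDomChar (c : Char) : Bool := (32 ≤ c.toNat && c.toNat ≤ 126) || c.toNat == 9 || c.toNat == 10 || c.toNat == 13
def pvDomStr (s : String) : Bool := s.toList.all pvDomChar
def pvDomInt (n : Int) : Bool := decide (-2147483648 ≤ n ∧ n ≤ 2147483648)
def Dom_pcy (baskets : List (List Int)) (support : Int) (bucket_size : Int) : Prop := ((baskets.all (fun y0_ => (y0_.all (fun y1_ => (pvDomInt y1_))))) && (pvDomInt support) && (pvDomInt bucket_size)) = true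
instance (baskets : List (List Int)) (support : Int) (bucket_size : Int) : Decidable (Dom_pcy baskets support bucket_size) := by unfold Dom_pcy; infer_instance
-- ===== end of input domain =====

-- B replaces A's full rescan of all baskets for each of the O(F^2) candidate pairs by one pass
-- over the baskets that counts every co-occurring frequent pair once in a counter dict.

-- itertools.combinations(xs, 2), exact: pairs (xs[i], xs[j]) for i < j in order (used by both Pythons)
def combs2 {α : Type} : List α → List (α × α)
  | [] => []
  | a :: l => l.map (fun b => (a, b)) ++ combs2 l

-- ===== PORT A =====
def hash_pair_1 (pair : Int × Int) : Int := PySem.Int.mod (pair.1 + pair.2) 80021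

def get_bit_vector (buckets : List Int) (support : Int) : List Bool :=
  buckets.map (fun i => decide (support ≤ i))

def get_frequent_items (baskets : List (List Int)) (support : Int) : PySem.Dict Int Int :=
  let occurrences := baskets.foldl (fun d basket => basket.foldl (fun d x => d.modify x 0 (· + 1)) d) PySem.Dict.empty
  (occurrences.items.filter (fun kv => decide (support ≤ kv.2))).foldl (fun d kv => d.insert kv.1 kv.2) PySem.Dict.empty

-- bucket[key] += 1 / bit_vector[key]: pySetD/pyGetD are exact here since under Pre_ (0 < bucket_size)
-- key = hash % bucket_size lies in [0, bucket_size) = range of the list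
def pcy (baskets : List (List Int)) (support : Int) (bucket_size : Int) : List (Int × Int × Int) :=
  let bucket := baskets.foldl (fun bk basket =>
      (PySem.Set.ofList (combs2 basket)).foldl (fun bk pair =>
        let key := PySem.Int.mod (hash_pair_1 pair) bucket_size
        PySem.List.pySetD bk key (PySem.List.pyGetD bk key 0 + 1)) bk)
    (List.replicate bucket_size.toNat 0)
  let bit_vector := get_bit_vector bucket support
  let frequent_items := get_frequent_items baskets support
  let frequent_pairs := (combs2 frequent_items.keys).foldl (fun fp pair =>
      let key := PySem.Int.mod (hash_pair_1 pair) bucket_size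
      if PySem.List.pyGetD bit_vector key false then
        let pair_count : Int := baskets.foldl (fun s basket => if pair.1 ∈ basket ∧ pair.2 ∈ basket then s + 1 else s) 0
        if support ≤ pair_count then fp.insert pair pair_count else fp
      else fp) (PySem.Dict.empty : PySem.Dict (Int × Int) Int)
  frequent_pairs.items.map (fun kv => (kv.1.1, kv.1.2, kv.2))

-- ===== PORT B =====
def pcy_alt (baskets : List (List Int)) (support : Int) (bucket_size : Int) : List (Int × Int × Int) :=
  let bucket := baskets.foldl (fun bk basket =>
      (PySem.Set.ofList (combs2 basket)).foldl (fun bk pair =>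
        let key := PySem.Int.mod (PySem.Int.mod (pair.1 + pair.2) 80021) bucket_size
        PySem.List.pySetD bk key (PySem.List.pyGetD bk key 0 + 1)) bk)
    (List.replicate bucket_size.toNat 0)
  let bit_vector := bucket.map (fun c => decide (support ≤ c))
  let occurrences := baskets.foldl (fun d basket => basket.foldl (fun d x => d.modify x 0 (· + 1)) d) PySem.Dict.empty
  let frequent_items := (occurrences.items.filter (fun kv => decide (support ≤ kv.2))).map (fun kv => kv.1)
  let pair_counts := baskets.foldl (fun pc basket =>
      (combs2 (frequent_items.filter (fun k => decide (k ∈ basket)))).foldl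
        (fun pc q => pc.modify q 0 (· + 1)) pc) (PySem.Dict.empty : PySem.Dict (Int × Int) Int)
  let result := (combs2 frequent_items).foldl (fun r pair =>
      if PySem.List.pyGetD bit_vector (PySem.Int.mod (PySem.Int.mod (pair.1 + pair.2) 80021) bucket_size) false then
        let c := pair_counts.getD pair 0
        if support ≤ c then r.insert pair c else r
      else r) (PySem.Dict.empty : PySem.Dict (Int × Int) Int)
  result.items.map (fun kv => (kv.1.1, kv.1.2, kv.2))

-- ===== PRECONDITION & SPEC =====
-- Pre_ excludes exactly the inputs on which A raises: bucket_size ≤ 0 while some basket holds a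
-- pair or at least two items are frequent, where the Python '% bucket_size' / list indexing
-- raises ZeroDivisionError or IndexError.
def Pre_pcy (baskets : List (List Int)) (support : Int) (bucket_size : Int) : Prop :=
  0 < bucket_size ∨
    (baskets.all (fun b => b.length ≤ 1) ∧
      ((PySem.Set.ofList baskets.flatten).filter
        (fun k => decide (support ≤ (baskets.flatten.count k : Int)))).length ≤ 1)
instance (baskets : List (List Int)) (support : Int) (bucket_size : Int) : Decidable (Pre_pcy baskets support bucket_size) := by unfold Pre_pcy; infer_instance

def pvWitness_pcy : List (List Int) × Int × Int := ([[1, 2], [1, 2], [3]], 2, 5)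

def Spec_pcy (baskets : List (List Int)) (support : Int) (bucket_size : Int) (out : List (Int × Int × Int)) : Prop := out = pcy_alt baskets support bucket_size
instance (baskets : List (List Int)) (support : Int) (bucket_size : Int) (out : List (Int × Int × Int)) : Decidable (Spec_pcy baskets support bucket_size out) := by unfold Spec_pcy; infer_instance

-- ===== CLAIM (what is proved, stated in full; the proofs are below) =====
def Claim_equal_pcy : Prop := ∀ (baskets : List (List Int)) (support : Int) (bucket_size : Int), Dom_pcy baskets support bucket_size → Pre_pcy baskets support bucket_size → Spec_pcy baskets support bucket_size (pcy baskets support bucket_size)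

-- ===== LEMMAS AND PROOFS =====

theorem mem_combs2 {α : Type} {p : α × α} : ∀ {l : List α}, p ∈ combs2 l → p.1 ∈ l ∧ p.2 ∈ l := by
  intro l
  induction l with
  | nil => intro h; simp [combs2] at h
  | cons a t ih =>
    intro h
    simp only [combs2, List.mem_append, List.mem_map] at h
    rcases h with ⟨b, hb, hex⟩ | h
    · subst hex; exact ⟨List.mem_cons_self, List.mem_cons_of_mem _ hb⟩
    · rcases ih h with ⟨h1, h2⟩
      exact ⟨List.mem_cons_of_mem _ h1, List.mem_cons_of_mem _ h2⟩

theorem count_combs2_of_not_mem {α : Type} [DecidableEq α] {x y : α} {l : List α}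
    (hx : x ∉ l) : (combs2 l).count (x, y) = 0 := by
  rw [List.count_eq_zero]
  intro hmem
  exact hx (mem_combs2 hmem).1

-- in combinations of a duplicate-free list, a pair of the list survives filtering iff both
-- components do, and then occurs exactly once
theorem count_combs2_filter {α : Type} [DecidableEq α] (pr : α → Bool) (x y : α) :
    ∀ (l : List α), l.Nodup → (x, y) ∈ combs2 l →
    (combs2 (l.filter pr)).count (x, y) = if pr x && pr y then 1 else 0 := by
  intro l
  induction l with
  | nil => intro _ h; simp [combs2] at h
  | cons a t ih =>
    intro hnd h
    rw [List.nodup_cons] at hnd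
    obtain ⟨ha, hndt⟩ := hnd
    simp only [combs2, List.mem_append, List.mem_map] at h
    have hmapcount : ∀ (ft : List α), (ft.map (fun b => (a, b))).count (x, y) =
        if x = a then ft.count y else 0 := by
      intro ft
      by_cases hxa : x = a
      · subst hxa
        rw [if_pos rfl]
        have : ((x, y) : α × α) = (fun b => (x, b)) y := rfl
        rw [this, List.count_map_of_injective]
        intro b c hbc; simpa using hbc
      · rw [if_neg hxa, List.count_eq_zero]
        intro hmem
        rcases List.mem_map.1 hmem with ⟨b, _, hb⟩
        exact hxa (congrArg Prod.fst hb.symm)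
    rcases h with ⟨b, hb, hex⟩ | h
    · -- the pair is (a, b) with a ∉ t, b ∈ t
      injection hex with hxa hyb
      subst hxa; subst hyb
      by_cases hpa : pr a
      · rw [List.filter_cons_of_pos hpa]
        simp only [combs2, List.count_append]
        rw [hmapcount, if_pos rfl,
            count_combs2_of_not_mem (by simp [List.mem_filter, ha] : a ∉ t.filter pr)]
        by_cases hpy : pr b
        · rw [List.count_filter (by simpa using hpy)]
          simp [hpa, hpy, List.count_eq_one_of_mem hndt hb]
        · rw [List.count_eq_zero.2 (by simp [List.mem_filter, hpy] : b ∉ t.filter pr)]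
          simp [hpa, hpy]
      · rw [List.filter_cons_of_neg hpa]
        rw [count_combs2_of_not_mem (by simp [List.mem_filter, ha] : a ∉ t.filter pr)]
        simp [hpa]
    · -- (x, y) ∈ combs2 t, so x ∈ t and x ≠ a
      have hxt : x ∈ t := (mem_combs2 h).1
      have hxa : x ≠ a := fun hxa => ha (hxa ▸ hxt)
      by_cases hpa : pr a
      · rw [List.filter_cons_of_pos hpa]
        simp only [combs2, List.count_append]
        rw [hmapcount, if_neg hxa, ih hndt h]
        simp
      · rw [List.filter_cons_of_neg hpa]
        exact ih hndt h

-- loop invariant of B's single counting pass: the counter entry of `pair` advances exactly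
-- like A's per-pair membership count
theorem count_agree_aux (fitems : List Int) (pair : Int × Int)
    (hcount : ∀ basket : List Int,
      (combs2 (fitems.filter (fun k => decide (k ∈ basket)))).count pair
        = if pair.1 ∈ basket ∧ pair.2 ∈ basket then 1 else 0) :
    ∀ (baskets : List (List Int)) (d : PySem.Dict (Int × Int) Int) (s : Int),
      d.getD pair 0 = s →
      (baskets.foldl (fun pc basket =>
          (combs2 (fitems.filter (fun k => decide (k ∈ basket)))).foldl
            (fun pc q => pc.modify q 0 (· + 1)) pc) d).getD pair 0
        = baskets.foldl (fun s basket => if pair.1 ∈ basket ∧ pair.2 ∈ basket then s + 1 else s) s := by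
  intro baskets
  induction baskets with
  | nil => intro d s h; simpa using h
  | cons b bs ih =>
    intro d s h
    simp only [List.foldl_cons]
    apply ih
    rw [PySem.Dict.getD_foldl_modify_add_one, h, hcount b]
    split_ifs <;> simp

theorem count_agree (fitems : List Int) (hnd : fitems.Nodup) (pair : Int × Int)
    (hmem : pair ∈ combs2 fitems) (baskets : List (List Int)) :
    baskets.foldl (fun s basket => if pair.1 ∈ basket ∧ pair.2 ∈ basket then s + 1 else s) (0 : Int)
      = (baskets.foldl (fun pc basket =>
            (combs2 (fitems.filter (fun k => decide (k ∈ basket)))).foldl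
              (fun pc q => pc.modify q 0 (· + 1)) pc)
          (PySem.Dict.empty : PySem.Dict (Int × Int) Int)).getD pair 0 := by
  obtain ⟨x, y⟩ := pair
  refine (count_agree_aux fitems (x, y) ?_ baskets PySem.Dict.empty 0 (by simp)).symm
  intro basket
  rw [count_combs2_filter _ x y fitems hnd hmem]
  by_cases hx : x ∈ basket <;> by_cases hy : y ∈ basket <;> simp [hx, hy]

theorem keys_build (l : List (Int × Int)) (hnd : (l.map (fun kv => kv.1)).Nodup) :
    (l.foldl (fun d kv => d.insert kv.1 kv.2) (PySem.Dict.empty : PySem.Dict Int Int)).keys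
      = l.map (fun kv => kv.1) := by
  have h := PySem.Dict.keys_foldl_insert_key l (fun kv : Int × Int => kv.1)
      (fun _ kv => kv.2) (PySem.Dict.empty : PySem.Dict Int Int)
  rw [h, PySem.Dict.keys_empty, PySem.Set.update_nil_left]
  exact PySem.Set.ofList_eq_self_of_nodup _ hnd

theorem occ_keys_nodup (baskets : List (List Int)) :
    (baskets.foldl (fun d basket => basket.foldl (fun d x => d.modify x 0 (· + 1)) d)
      (PySem.Dict.empty : PySem.Dict Int Int)).keys.Nodup := by
  have h : ∀ (bs : List (List Int)) (d : PySem.Dict Int Int), d.keys.Nodup →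
      (bs.foldl (fun d basket => basket.foldl (fun d x => d.modify x 0 (· + 1)) d) d).keys.Nodup := by
    intro bs
    induction bs with
    | nil => intro d h; simpa using h
    | cons b t ih =>
      intro d h
      simp only [List.foldl_cons]
      exact ih _ (PySem.Dict.nodup_keys_foldl_modify_key b (fun x => x) 0 (fun _ _ => (· + 1)) d h)
  exact h baskets _ (by simp)

-- ===== VERDICT (by name: the statement is the Claim_ definition above) =====
theorem pcy_spec : Claim_equal_pcy := by
  intro baskets support bucket_size _ _
  unfold Spec_pcy
  have hoccnd := occ_keys_nodup baskets
  simp only [PySem.Dict.keys] at hoccnd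
  have hnd : (((baskets.foldl (fun d basket => basket.foldl (fun d x => d.modify x 0 (· + 1)) d)
      (PySem.Dict.empty : PySem.Dict Int Int)).items.filter
        (fun kv => decide (support ≤ kv.2))).map (fun kv => kv.1)).Nodup :=
    hoccnd.sublist (List.Sublist.map _ List.filter_sublist)
  have hkeys : (get_frequent_items baskets support).keys
      = ((baskets.foldl (fun d basket => basket.foldl (fun d x => d.modify x 0 (· + 1)) d)
          (PySem.Dict.empty : PySem.Dict Int Int)).items.filter
            (fun kv => decide (support ≤ kv.2))).map (fun kv => kv.1) := by
    unfold get_frequent_items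
    exact keys_build _ hnd
  simp only [pcy, pcy_alt, get_bit_vector, hash_pair_1, hkeys]
  congr 1
  congr 1
  apply PySem.List.foldl_congr_mem'
  intro pair hpair fp
  rw [count_agree _ hnd pair hpair baskets]
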